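-- pv_equiv track=rewrite | github.com/LokeshCBGitHub/gpdm-healthcare-analytics | scripts/tokenizer_utils.py | extract_schema_entities
-- ===== SOURCE A (Python) =====
-- from typing import Set, List, Dict, Tuple, Optional, NamedTuple
--
-- class SchemaMatch(NamedTuple):
--     name: str
--     entity_type: str
--     source_table: str
--     match_pos: int
--
-- def extract_schema_entities(
--     text: str,
--     schema_tables: Optional[List[str]] = None,
--     schema_columns: Optional[Dict[str, List[str]]] = None,
-- ) -> List[SchemaMatch]:
--     if not text:
--         return []
--
--     q_lower = text.lower()
--     matches = []
--
--     if schema_tables: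
--         sorted_tables = sorted(schema_tables, key=len, reverse=True)
--         for tbl in sorted_tables:
--             tl = tbl.lower()
--             pos = q_lower.find(tl)
--             if pos >= 0:
--                 matches.append(SchemaMatch(
--                     name=tbl,
--                     entity_type='table',
--                     source_table=tbl,
--                     match_pos=pos,
--                 ))
--
--     if schema_columns:
--         all_cols = []
--         for tbl, cols in schema_columns.items():
--             for col in cols:
--                 all_cols.append((col, tbl))
--         all_cols.sort(key=lambda x: len(x[0]), reverse=True)
--
--         for col_name, tbl_name in all_cols:
--             cl = col_name.lower()
--             variants = [cl, cl.replace('_', ' ')]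
--             for variant in variants:
--                 pos = q_lower.find(variant)
--                 if pos >= 0:
--                     matches.append(SchemaMatch(
--                         name=col_name,
--                         entity_type='column',
--                         source_table=tbl_name,
--                         match_pos=pos,
--                     ))
--                     break
--
--     matches.sort(key=lambda m: m.match_pos)
--     return matches
-- ===== SOURCE B (Python) =====
-- from typing import List, Dict, Optional, NamedTuple
--
-- class SchemaMatch(NamedTuple):
--     name: str
--     entity_type: str
--     source_table: str
--     match_pos: int
--
-- def extract_schema_entities(
--     text: str,
--     schema_tables: Optional[List[str]] = None,
--     schema_columns: Optional[Dict[str, List[str]]] = None,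
-- ) -> List[SchemaMatch]:
--     if not text:
--         return []
--
--     q = text.lower()
--
--     # 1) collect all candidate entries, in priority order (tables first,
--     #    each group longest-name-first, stable), with their needle variants
--     entries = []  # (name, entity_type, source_table, [needle variants])
--     if schema_tables:
--         for tbl in sorted(schema_tables, key=len, reverse=True):
--             entries.append((tbl, 'table', tbl, [tbl.lower()]))
--     if schema_columns:
--         cols = [(col, tbl) for tbl, cs in schema_columns.items() for col in cs]
--         cols.sort(key=lambda p: len(p[0]), reverse=True)
--         for col, tbl in cols:
--             cl = col.lower()
--             entries.append((col, 'column', tbl, [cl, cl.replace('_', ' ')]))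
--
--     # 2) one left-to-right scan over the text computes the first occurrence
--     #    of every distinct needle at once (instead of one find() per needle),
--     #    testing at each position only the needles that start with that character
--     needles = list(dict.fromkeys(nd for e in entries for nd in e[3]))
--     buckets = {}  # first character -> needles starting with it
--     first = {}    # the empty needle occurs at 0; text is nonempty here
--     for nd in needles:
--         if nd:
--             buckets[nd[0]] = buckets.get(nd[0], []) + [nd]
--         else:
--             first[nd] = 0
--     for j in range(len(q)):
--         for nd in buckets.get(q[j], []):
--             if nd not in first and q.startswith(nd, j):
--                 first[nd] = j
--
--     # 3) emit one match per entry from its first variant that occurs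
--     matches = []
--     for name, etype, tbl, nds in entries:
--         for nd in nds:
--             if nd in first:
--                 matches.append(SchemaMatch(name, etype, tbl, first[nd]))
--                 break
--
--     matches.sort(key=lambda m: m.match_pos)
--     return matches
-- ===== Notes on version B (the rewrite author's own statement) =====
-- stated objective: alternative
-- what changed: A calls str.find once per pattern variant; B collects all candidate entries first, makes one left-to-right scan over the text that records the first occurrence of every distinct needle in a dict at once, and then emits each entry's match from that table.
import Mathlib
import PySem

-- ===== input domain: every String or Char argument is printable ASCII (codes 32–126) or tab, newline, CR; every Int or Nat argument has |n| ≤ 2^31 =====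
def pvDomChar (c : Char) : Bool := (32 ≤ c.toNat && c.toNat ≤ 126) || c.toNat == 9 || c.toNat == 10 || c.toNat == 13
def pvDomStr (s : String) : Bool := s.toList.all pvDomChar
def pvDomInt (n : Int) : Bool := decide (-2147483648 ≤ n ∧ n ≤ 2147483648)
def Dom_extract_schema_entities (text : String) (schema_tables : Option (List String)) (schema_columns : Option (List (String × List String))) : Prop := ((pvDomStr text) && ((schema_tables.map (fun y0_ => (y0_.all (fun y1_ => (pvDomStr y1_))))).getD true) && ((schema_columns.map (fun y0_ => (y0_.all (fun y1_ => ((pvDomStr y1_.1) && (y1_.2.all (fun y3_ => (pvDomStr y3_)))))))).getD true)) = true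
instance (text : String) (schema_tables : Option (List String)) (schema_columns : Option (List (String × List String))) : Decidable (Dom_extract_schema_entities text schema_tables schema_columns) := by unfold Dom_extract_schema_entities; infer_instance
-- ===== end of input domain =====

-- B replaces A's one str.find call per pattern by a single left-to-right scan of the text that
-- records the first occurrence of every distinct needle at once (objective: alternative).

-- ===== PORT A =====
-- A's 'for variant in variants: pos = q_lower.find(variant); if pos >= 0: … break'
def pvFindVariants (ql : List Char) : List (List Char) → Option Int
  | [] => none
  | v :: rest =>
    let pos := PySem.Chars.find ql v
    if 0 ≤ pos then some pos else pvFindVariants ql rest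

-- the 'if schema_tables: … for tbl in sorted_tables: …' block ('matches' after it)
def pvA_m1 (ql : List Char) : Option (List String) → List (String × String × String × Int)
  | none => []
  | some tables =>
    if tables = [] then []
    else
      (PySem.List.sorted tables (fun t => PySem.Str.len t) true).foldl
        (fun acc tbl =>
          let pos := PySem.Chars.find ql (PySem.Chars.lower tbl.toList)
          if 0 ≤ pos then acc ++ [(tbl, "table", tbl, pos)] else acc) []

-- the 'if schema_columns: …' block, continuing to append to 'matches' (= m1)
def pvA_m2 (ql : List Char) (m1 : List (String × String × String × Int)) : Option (List (String × List String)) → List (String × String × String × Int)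
  | none => m1
  | some pairs =>
    if pairs = [] then m1
    else
      let allCols := (PySem.Dict.ofList pairs).items.foldl
        (fun acc p => p.2.foldl (fun acc2 col => acc2 ++ [(col, p.1)]) acc) []
      (PySem.List.sorted allCols (fun p => PySem.Str.len p.1) true).foldl
        (fun acc p =>
          let cl := PySem.Chars.lower p.1.toList
          match pvFindVariants ql [cl, PySem.Chars.replace cl ['_'] [' ']] with
          | some pos => acc ++ [(p.1, "column", p.2, pos)]
          | none => acc) m1

def extract_schema_entities (text : String) (schema_tables : Option (List String)) (schema_columns : Option (List (String × List String))) : List (String × String × String × Int) :=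
  if text.toList = [] then []
  else
    let ql := PySem.Chars.lower text.toList
    PySem.List.sorted (pvA_m2 ql (pvA_m1 ql schema_tables) schema_columns) (fun m => m.2.2.2) false

-- ===== PORT B =====
-- 'q.startswith(nd, j)' for 0 ≤ j (exact there: Python reads the start as a clamped slice bound)
def pvStartsAt (ql nd : List Char) (j : Int) : Bool :=
  PySem.Chars.startswith (ql.drop j.toNat) nd

-- one loop builds both indexes: buckets[c] = needles starting with c, and the
-- pre-seeded first occurrence of the empty needle (position 0)
def pvBuildIdx (needles : List (List Char)) : PySem.Dict Char (List (List Char)) × PySem.Dict (List Char) Int :=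
  needles.foldl
    (fun st nd =>
      (match nd with
       | [] => st.1
       | c :: _ => st.1.insert c (st.1.getD c [] ++ [nd]),
       match nd with
       | [] => st.2.insert [] 0
       | _ :: _ => st.2))
    (PySem.Dict.empty, PySem.Dict.empty)

-- the single scan: first[nd] = first position at which needle nd occurs;
-- 'q[j]' is ported as pyGetD (the default is never read: 0 ≤ j < len q)
def pvScan (ql : List Char) (needles : List (List Char)) : PySem.Dict (List Char) Int :=
  let st := pvBuildIdx needles
  (PySem.List.pyRange 0 (ql.length : Int) 1).foldl
    (fun d j => (st.1.getD (PySem.List.pyGetD ql j ' ') []).foldl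
      (fun d nd => if d.contains nd = false ∧ pvStartsAt ql nd j = true then d.insert nd j else d) d)
    st.2

-- 'for nd in nds: if nd in first: …; break'
def pvFirstFound (d : PySem.Dict (List Char) Int) : List (List Char) → Option Int
  | [] => none
  | nd :: rest =>
    match d.get? nd with
    | some p => some p
    | none => pvFirstFound d rest

-- table entries ('if schema_tables: …')
def pvB_e1 : Option (List String) → List (String × String × String × List (List Char))
  | none => []
  | some tables =>
    if tables = [] then []
    else
      (PySem.List.sorted tables (fun t => PySem.Str.len t) true).foldl
        (fun acc tbl => acc ++ [(tbl, "table", tbl, [PySem.Chars.lower tbl.toList])]) []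

-- column entries appended after the table entries ('if schema_columns: …')
def pvB_entries (e1 : List (String × String × String × List (List Char))) : Option (List (String × List String)) → List (String × String × String × List (List Char))
  | none => e1
  | some pairs =>
    if pairs = [] then e1
    else
      let allCols := (PySem.Dict.ofList pairs).items.foldl
        (fun acc p => p.2.foldl (fun acc2 col => acc2 ++ [(col, p.1)]) acc) []
      (PySem.List.sorted allCols (fun p => PySem.Str.len p.1) true).foldl
        (fun acc p =>
          let cl := PySem.Chars.lower p.1.toList
          acc ++ [(p.1, "column", p.2, [cl, PySem.Chars.replace cl ['_'] [' ']])]) e1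

-- emit one match per entry from its first variant that occurs
def pvBStep (first : PySem.Dict (List Char) Int) (acc : List (String × String × String × Int)) (e : String × String × String × List (List Char)) : List (String × String × String × Int) :=
  match pvFirstFound first e.2.2.2 with
  | some p => acc ++ [(e.1, e.2.1, e.2.2.1, p)]
  | none => acc

def extract_schema_entities_alt (text : String) (schema_tables : Option (List String)) (schema_columns : Option (List (String × List String))) : List (String × String × String × Int) :=
  if text.toList = [] then []
  else
    let ql := PySem.Chars.lower text.toList
    let entries := pvB_entries (pvB_e1 schema_tables) schema_columns
    let needles := PySem.List.dedup (entries.flatMap (fun e => e.2.2.2))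
    let first := pvScan ql needles
    PySem.List.sorted (entries.foldl (pvBStep first) []) (fun m => m.2.2.2) false

-- ===== PRECONDITION & SPEC =====
def Spec_extract_schema_entities (text : String) (schema_tables : Option (List String)) (schema_columns : Option (List (String × List String))) (out : List (String × String × String × Int)) : Prop := out = extract_schema_entities_alt text schema_tables schema_columns
instance (text : String) (schema_tables : Option (List String)) (schema_columns : Option (List (String × List String))) (out : List (String × String × String × Int)) : Decidable (Spec_extract_schema_entities text schema_tables schema_columns out) := by unfold Spec_extract_schema_entities; infer_instance

-- ===== CLAIM (what is proved, stated in full; the proofs are below) =====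
def Claim_equal_extract_schema_entities : Prop := ∀ (text : String) (schema_tables : Option (List String)) (schema_columns : Option (List (String × List String))), Dom_extract_schema_entities text schema_tables schema_columns → Spec_extract_schema_entities text schema_tables schema_columns (extract_schema_entities text schema_tables schema_columns)

-- ===== LEMMAS AND PROOFS =====

-- A's per-entry step, phrased on B's entry tuples (used to bridge the two folds)
def pvAStep (ql : List Char) (acc : List (String × String × String × Int)) (e : String × String × String × List (List Char)) : List (String × String × String × Int) :=
  match pvFindVariants ql e.2.2.2 with
  | some pos => acc ++ [(e.1, e.2.1, e.2.2.1, pos)]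
  | none => acc

-- the inner fold of pvScan, at one position j, looked up at any key
lemma pvScan_inner_get (ql : List Char) (j : Int) (needles : List (List Char)) (d : PySem.Dict (List Char) Int) (k : List Char) :
    (needles.foldl (fun d nd => if d.contains nd = false ∧ pvStartsAt ql nd j = true then d.insert nd j else d) d).get? k
      = if k ∈ needles ∧ d.contains k = false ∧ pvStartsAt ql k j = true then some j else d.get? k := by
  induction needles generalizing d with
  | nil => simp
  | cons nd rest ih =>
    simp only [List.foldl_cons, ih]
    by_cases hk : k = nd
    · subst hk
      by_cases hc : d.contains k = false ∧ pvStartsAt ql k j = true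
      · rw [if_pos hc]
        have h1 : (d.insert k j).contains k = true := PySem.Dict.contains_insert_self d k j
        rw [if_neg (by simp [h1]), PySem.Dict.get?_insert_self,
          if_pos ⟨List.mem_cons_self, hc⟩]
      · rw [if_neg hc, if_neg (fun h => hc h.2)]
        by_cases hm : k ∈ rest
        · by_cases hc2 : d.contains k = false ∧ pvStartsAt ql k j = true
          · exact absurd hc2 hc
          · rw [if_neg (fun h => hc ⟨h.2.1, h.2.2⟩)]
        · rw [if_neg (fun h => hc ⟨h.2.1, h.2.2⟩)]
    · have hmem : k ∈ nd :: rest ↔ k ∈ rest := by simp [hk]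
      by_cases hc : d.contains nd = false ∧ pvStartsAt ql nd j = true
      · rw [if_pos hc]
        have hcon : (d.insert nd j).contains k = d.contains k := by
          rw [PySem.Dict.contains_insert]
          simp [hk]
        rw [PySem.Dict.get?_insert_of_ne (hne := hk), hcon]
        by_cases h2 : k ∈ rest ∧ d.contains k = false ∧ pvStartsAt ql k j = true
        · rw [if_pos h2, if_pos ⟨List.mem_cons_of_mem _ h2.1, h2.2⟩]
        · rw [if_neg h2, if_neg (fun h => h2 ⟨hmem.mp h.1, h.2⟩)]
      · rw [if_neg hc]
        by_cases h2 : k ∈ rest ∧ d.contains k = false ∧ pvStartsAt ql k j = true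
        · rw [if_pos h2, if_pos ⟨List.mem_cons_of_mem _ h2.1, h2.2⟩]
        · rw [if_neg h2, if_neg (fun h => h2 ⟨hmem.mp h.1, h.2⟩)]

-- scan over positions [0, m): the dict holds exactly the finds that land below m
lemma pvBuildIdx_eq (needles : List (List Char)) :
    pvBuildIdx needles =
      (needles.foldl (fun b nd => match nd with
         | [] => b
         | c :: _ => b.insert c (b.getD c [] ++ [nd])) PySem.Dict.empty,
       needles.foldl (fun f nd => match nd with
         | [] => f.insert ([] : List Char) (0 : Int)
         | _ :: _ => f) PySem.Dict.empty) := by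
  unfold pvBuildIdx
  exact PySem.List.foldl_prod_mk
    (fun (b : PySem.Dict Char (List (List Char))) nd => match nd with
      | [] => b
      | c :: _ => b.insert c (b.getD c [] ++ [nd]))
    (fun (f : PySem.Dict (List Char) Int) nd => match nd with
      | [] => f.insert ([] : List Char) (0 : Int)
      | _ :: _ => f) needles _ _

lemma pvBuildIdx_fst_aux (needles : List (List Char)) (b : PySem.Dict Char (List (List Char))) (c : Char) :
    (needles.foldl (fun b nd => match nd with
       | [] => b
       | c' :: _ => b.insert c' (b.getD c' [] ++ [nd])) b).getD c []
      = b.getD c [] ++ needles.filter (fun nd => nd.head? == some c) := by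
  induction needles generalizing b with
  | nil => simp
  | cons nd rest ih =>
    cases nd with
    | nil => simpa using ih b
    | cons c' t =>
      simp only [List.foldl_cons, ih, List.filter_cons]
      by_cases hc : c = c'
      · subst hc
        simp
      · have hne : ((c' :: t).head? == some c) = false := by
          simp only [List.head?_cons, beq_eq_false_iff_ne, ne_eq, Option.some.injEq]
          exact fun h => hc h.symm
        rw [PySem.Dict.getD_insert, if_neg hc, hne]
        simp

lemma pvBuildIdx_snd_aux (needles : List (List Char)) (f : PySem.Dict (List Char) Int) (k : List Char) :
    (needles.foldl (fun f nd => match nd with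
       | [] => f.insert ([] : List Char) (0 : Int)
       | _ :: _ => f) f).get? k
      = if k = [] ∧ [] ∈ needles then some 0 else f.get? k := by
  induction needles generalizing f with
  | nil => simp
  | cons nd rest ih =>
    cases nd with
    | nil =>
      simp only [List.foldl_cons, ih]
      by_cases hk : k = []
      · subst hk
        by_cases hm : ([] : List Char) ∈ rest
        · simp [hm]
        · simp [hm, PySem.Dict.get?_insert_self]
      · simp [hk, PySem.Dict.get?_insert_of_ne (hne := hk)]
    | cons c t =>
      simp only [List.foldl_cons, ih]
      have hmem : (([] : List Char) ∈ (c :: t) :: rest) ↔ (([] : List Char) ∈ rest) := by simp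
      by_cases h : k = [] ∧ ([] : List Char) ∈ rest
      · rw [if_pos h, if_pos ⟨h.1, hmem.mpr h.2⟩]
      · rw [if_neg h, if_neg (fun hh => h ⟨hh.1, hmem.mp hh.2⟩)]

lemma pvScan_inv (ql : List Char) (needles : List (List Char)) (m : Nat) (k : List Char) (hk : k ∈ needles) :
    ((PySem.List.pyRange 0 (m : Int) 1).foldl
      (fun d j => ((pvBuildIdx needles).1.getD (PySem.List.pyGetD ql j ' ') []).foldl
        (fun d nd => if d.contains nd = false ∧ pvStartsAt ql nd j = true then d.insert nd j else d) d)
      (pvBuildIdx needles).2).get? k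
      = if k = [] then some 0
        else if 0 ≤ PySem.Chars.find ql k ∧ PySem.Chars.find ql k < (m : Int) then some (PySem.Chars.find ql k) else none := by
  induction m with
  | zero =>
    rw [PySem.List.pyRange_one_eq_nil (by norm_num), List.foldl_nil,
      pvBuildIdx_eq, pvBuildIdx_snd_aux]
    by_cases hk0 : k = []
    · rw [if_pos ⟨hk0, hk0 ▸ hk⟩, if_pos hk0]
    · rw [if_neg (fun h => hk0 h.1), if_neg hk0, if_neg (by intro h; omega)]
      simp
  | succ m ih =>
    have hcast : ((m + 1 : Nat) : Int) = (m : Int) + 1 := by push_cast; ring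
    rw [hcast, PySem.List.pyRange_one_succ_right (by positivity), List.foldl_append]
    simp only [List.foldl_cons, List.foldl_nil]
    rw [pvScan_inner_get, ih]
    have hbucket : ∀ c : Char, (pvBuildIdx needles).1.getD c []
        = needles.filter (fun nd => nd.head? == some c) := by
      intro c
      rw [pvBuildIdx_eq]
      have := pvBuildIdx_fst_aux needles PySem.Dict.empty c
      simpa using this
    by_cases hk0 : k = []
    · subst hk0
      rw [if_neg ?_, if_pos rfl, if_pos rfl]
      intro h
      have := h.1
      rw [hbucket, List.mem_filter] at this
      simp at this
    · rw [if_neg hk0, if_neg hk0]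
      set f := PySem.Chars.find ql k with hf
      by_cases h1 : 0 ≤ f ∧ f < (m : Int)
      · rw [if_neg ?_, if_pos h1, if_pos ⟨h1.1, by omega⟩]
        intro h
        have := h.2.1
        rw [PySem.Dict.contains_eq_isSome_get?, ih, if_neg hk0, if_pos h1] at this
        simp at this
      · rw [if_neg h1]
        have hcontf : (((PySem.List.pyRange 0 (m : Int) 1).foldl
            (fun d j => ((pvBuildIdx needles).1.getD (PySem.List.pyGetD ql j ' ') []).foldl
              (fun d nd => if d.contains nd = false ∧ pvStartsAt ql nd j = true then d.insert nd j else d) d)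
            (pvBuildIdx needles).2).contains k) = false := by
          rw [PySem.Dict.contains_eq_isSome_get?, ih, if_neg hk0, if_neg h1]; rfl
        by_cases hsw : pvStartsAt ql k (m : Int) = true
        · -- the needle occurs at position m and nowhere earlier: find = m
          have hpre : k <+: ql.drop m := by
            have := hsw
            unfold pvStartsAt at this
            rw [Int.toNat_natCast] at this
            exact (PySem.Chars.startswith_iff _ _).mp this
          obtain ⟨c0, t0, hkk⟩ : ∃ c0 t0, k = c0 :: t0 := by
            cases k with
            | nil => exact absurd rfl hk0
            | cons a b => exact ⟨a, b, rfl⟩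
          have hhead : ql[m]? = some c0 := by
            rw [← List.head?_drop]
            rcases hpre with ⟨s, hs⟩
            rw [← hs, hkk]
            rfl
          have hmlt : m < ql.length := by
            by_contra hge
            rw [List.getElem?_eq_none (by omega)] at hhead
            simp at hhead
          have hgetd : PySem.List.pyGetD ql (m : Int) ' ' = c0 := by
            rw [PySem.List.pyGetD_natCast, List.getD_eq_getElem ql ' ' hmlt]
            rw [List.getElem?_eq_getElem hmlt] at hhead
            exact Option.some.inj hhead
          have hmem : k ∈ (pvBuildIdx needles).1.getD (PySem.List.pyGetD ql (m : Int) ' ') [] := by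
            rw [hgetd, hbucket, List.mem_filter]
            exact ⟨hk, by rw [hkk]; simp⟩
          have hpos : 0 ≤ f := by
            rw [hf, PySem.Chars.find_nonneg_iff]
            have : PySem.Chars.isIn k ql = true :=
              (PySem.Chars.exists_prefix_drop_iff_isIn k ql).mp ⟨m, hpre⟩
            exact (PySem.Chars.isIn_iff_infix _ _).mp this
          have hfm : f = (m : Int) := by
            have hmle : (m : Int) ≤ f := by omega
            by_contra hne
            have hlt : m < f.toNat := by omega
            exact ((PySem.Chars.find_spec hpos).2 m hlt) hpre
          rw [if_pos ⟨hmem, hcontf, hsw⟩, if_pos ⟨hpos, by omega⟩, hfm]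
        · rw [if_neg (fun h => hsw h.2.2), if_neg ?_]
          intro h
          have hfm : f = (m : Int) := by omega
          have hpre := (PySem.Chars.find_spec h.1).1
          rw [← hf, hfm, Int.toNat_natCast] at hpre
          exact hsw (by unfold pvStartsAt; rw [Int.toNat_natCast]; exact (PySem.Chars.startswith_iff _ _).mpr hpre)

lemma pvScan_get (ql : List Char) (needles : List (List Char)) (k : List Char) (hk : k ∈ needles) :
    (pvScan ql needles).get? k
      = if 0 ≤ PySem.Chars.find ql k then some (PySem.Chars.find ql k) else none := by
  unfold pvScan
  simp only
  rw [pvScan_inv ql needles ql.length k hk]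
  by_cases hk0 : k = []
  · subst hk0
    rw [if_pos rfl, PySem.Chars.find_nil, if_pos (by norm_num)]
  · rw [if_neg hk0]
    by_cases hpos : 0 ≤ PySem.Chars.find ql k
    · have hlt : PySem.Chars.find ql k < (ql.length : Int) := by
        have hpre := (PySem.Chars.find_spec hpos).1
        have hlen : k.length ≤ ql.length - (PySem.Chars.find ql k).toNat :=
          (hpre.sublist.length_le).trans_eq (List.length_drop ..)
        have hkpos : 0 < k.length := List.length_pos_iff.mpr hk0
        omega
      rw [if_pos ⟨hpos, hlt⟩, if_pos hpos]
    · rw [if_neg (fun h => hpos h.1), if_neg hpos]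

-- B's break-loop over the variants equals A's find-loop
lemma pvFirstFound_eq (ql : List Char) (needles : List (List Char)) (vs : List (List Char))
    (hvs : ∀ v ∈ vs, v ∈ needles) :
    pvFirstFound (pvScan ql needles) vs = pvFindVariants ql vs := by
  induction vs with
  | nil => rfl
  | cons v rest ih =>
    unfold pvFirstFound pvFindVariants
    rw [pvScan_get ql needles v (hvs v List.mem_cons_self)]
    by_cases hpos : 0 ≤ PySem.Chars.find ql v
    · rw [if_pos hpos]
      simp [hpos]
    · rw [if_neg hpos]
      simp only [if_neg hpos]
      exact ih (fun w hw => hvs w (List.mem_cons_of_mem _ hw))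

-- B's match fold, with the scan dict, equals the same fold with per-entry finds
lemma pvMatches_eq (ql : List Char) (entries : List (String × String × String × List (List Char))) :
    entries.foldl (pvBStep (pvScan ql (PySem.List.dedup (entries.flatMap (fun e => e.2.2.2))))) []
      = entries.foldl (pvAStep ql) [] := by
  apply PySem.List.foldl_congr_mem'
  intro e he acc
  unfold pvBStep pvAStep
  rw [pvFirstFound_eq ql _ _ ?_]
  intro v hv
  rw [PySem.List.mem_dedup]
  exact List.mem_flatMap.mpr ⟨e, he, hv⟩

-- the table entries, folded with per-entry finds, are A's table matches
lemma pvTable_eq (ql : List Char) (schema_tables : Option (List String)) :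
    (pvB_e1 schema_tables).foldl (pvAStep ql) [] = pvA_m1 ql schema_tables := by
  cases schema_tables with
  | none => rfl
  | some tables =>
    simp only [pvB_e1, pvA_m1]
    by_cases h : tables = []
    · rw [if_pos h, if_pos h]
      rfl
    · rw [if_neg h, if_neg h,
        PySem.List.foldl_append_singleton_eq_map, List.nil_append, List.foldl_map]
      apply PySem.List.foldl_congr_mem'
      intro tbl _ acc
      unfold pvAStep pvFindVariants
      by_cases hp : 0 ≤ PySem.Chars.find ql (PySem.Chars.lower tbl.toList)
      · simp only [if_pos hp]
      · simp only [if_neg hp]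
        rfl

-- the full entry list, folded with per-entry finds, is A's match list
lemma pvEntries_eq (ql : List Char) (schema_tables : Option (List String)) (schema_columns : Option (List (String × List String))) :
    (pvB_entries (pvB_e1 schema_tables) schema_columns).foldl (pvAStep ql) []
      = pvA_m2 ql (pvA_m1 ql schema_tables) schema_columns := by
  cases schema_columns with
  | none => exact pvTable_eq ql schema_tables
  | some pairs =>
    simp only [pvB_entries, pvA_m2]
    by_cases h : pairs = []
    · rw [if_pos h, if_pos h]
      exact pvTable_eq ql schema_tables
    · rw [if_neg h, if_neg h]
      rw [PySem.List.foldl_append_singleton_eq_map, List.foldl_append, List.foldl_map,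
        pvTable_eq ql schema_tables]
      rfl

-- ===== VERDICT (by name: the statement is the Claim_ definition above) =====
theorem extract_schema_entities_spec : Claim_equal_extract_schema_entities := by
  intro text schema_tables schema_columns _
  unfold Spec_extract_schema_entities extract_schema_entities extract_schema_entities_alt
  by_cases htext : text.toList = []
  · rw [if_pos htext, if_pos htext]
  · rw [if_neg htext, if_neg htext]
    simp only
    rw [pvMatches_eq, pvEntries_eq]
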